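-- pv_equiv track=rewrite | github.com/daniel-reich/ubiquitous-fiesta | 7RrPMoWifqRHPPqj2_19.py | safecracker
-- ===== SOURCE A (Python) =====
-- def safecracker(start, increments):
--   curr = start
--   sgn = -1
--   result = []
--   while len(increments) > 0:
--     curr = (curr + sgn * increments.pop(0)) % 100
--     result.append(curr)
--     sgn *= -1
--   return result
-- ===== SOURCE B (Python) =====
-- def safecracker(start, increments):
--     # pass 1: drain increments (same mutation as A), collecting signed deltas
--     deltas = []
--     sgn = -1
--     while increments:
--         deltas.append(sgn * increments.pop(0))
--         sgn = -sgn
--     # pass 2: cumulative sums of deltas; each output is (start + prefix sum) mod 100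
--     result = []
--     total = 0
--     for d in deltas:
--         total += d
--         result.append((start + total) % 100)
--     return result
-- ===== Notes on version B (the rewrite author's own statement) =====
-- stated objective: alternative
-- what changed: B separates A's fused loop into two passes: first extract alternating-sign deltas (draining the list like A), then emit (start + running prefix sum) % 100, modding a single accumulated sum instead of re-modding a carried current value each step.
import Mathlib
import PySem

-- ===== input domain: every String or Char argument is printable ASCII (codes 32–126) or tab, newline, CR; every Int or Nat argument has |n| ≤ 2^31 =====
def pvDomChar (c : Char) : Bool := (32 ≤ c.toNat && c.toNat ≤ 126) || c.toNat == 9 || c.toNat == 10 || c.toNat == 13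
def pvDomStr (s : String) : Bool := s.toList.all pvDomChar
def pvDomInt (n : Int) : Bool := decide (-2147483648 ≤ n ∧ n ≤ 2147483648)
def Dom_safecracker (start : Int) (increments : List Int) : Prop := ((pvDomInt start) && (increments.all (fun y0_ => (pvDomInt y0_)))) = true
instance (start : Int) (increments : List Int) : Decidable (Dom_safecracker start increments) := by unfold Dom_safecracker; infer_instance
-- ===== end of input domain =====

-- B splits A's fused loop into two passes (signed deltas, then prefix-sum mod); return-value equivalence only — both Pythons drain `increments` in place.
-- ===== PORT A =====
-- A's while loop: state (curr, sgn, result), consuming increments front-to-back.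
def safecrackerLoop (curr sgn : Int) (result : List Int) : List Int → List Int
  | [] => result
  | x :: xs =>
      let c := PySem.Int.mod (curr + sgn * x) 100
      safecrackerLoop c (sgn * (-1)) (result ++ [c]) xs

def safecracker (start : Int) (increments : List Int) : List Int :=
  safecrackerLoop start (-1) [] increments

-- ===== PORT B =====
-- pass 1 of B: alternating-sign deltas
def altDeltas (sgn : Int) : List Int → List Int
  | [] => []
  | x :: xs => sgn * x :: altDeltas (-sgn) xs

-- pass 2 of B: running total, output (start + total) % 100 per delta
def cumOut (start total : Int) : List Int → List Int
  | [] => []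
  | d :: ds => PySem.Int.mod (start + (total + d)) 100 :: cumOut start (total + d) ds

def safecracker_alt (start : Int) (increments : List Int) : List Int :=
  cumOut start 0 (altDeltas (-1) increments)

-- ===== PRECONDITION & SPEC =====
def Spec_safecracker (start : Int) (increments : List Int) (out : List Int) : Prop := out = safecracker_alt start increments
instance (start : Int) (increments : List Int) (out : List Int) : Decidable (Spec_safecracker start increments out) := by unfold Spec_safecracker; infer_instance

-- ===== CLAIM (what is proved, stated in full; the proofs are below) =====
def Claim_equal_safecracker : Prop := ∀ (start : Int) (increments : List Int), Dom_safecracker start increments → Spec_safecracker start increments (safecracker start increments)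

-- ===== LEMMAS AND PROOFS =====
-- key step: one modded step agrees when curr ≡ start + total (mod 100)
lemma mod_step (curr start total d : Int) (h : curr % 100 = (start + total) % 100) :
    PySem.Int.mod (curr + d) 100 = PySem.Int.mod (start + (total + d)) 100 := by
  rw [PySem.Int.mod_eq_emod_of_pos (by norm_num), PySem.Int.mod_eq_emod_of_pos (by norm_num)]
  have : (curr + d) % 100 = ((start + total) + d) % 100 := Int.ModEq.add_right d h
  simpa [add_assoc] using this

-- loop invariant: A's loop with curr ≡ start + total (mod 100) produces B's two-pass output
lemma loop_eq (incs : List Int) : ∀ (curr sgn start total : Int) (result : List Int),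
    curr % 100 = (start + total) % 100 →
    safecrackerLoop curr sgn result incs = result ++ cumOut start total (altDeltas sgn incs) := by
  induction incs with
  | nil => intro curr sgn start total result _; simp [safecrackerLoop, altDeltas, cumOut]
  | cons x xs ih =>
      intro curr sgn start total result h
      simp only [safecrackerLoop, altDeltas, cumOut]
      rw [mod_step curr start total (sgn * x) h]
      rw [ih _ (sgn * (-1)) start (total + sgn * x) _ ?_]
      · simp [mul_comm]
      · rw [PySem.Int.mod_eq_emod_of_pos (by norm_num)]
        simp [Int.emod_emod_of_dvd]

-- ===== VERDICT (by name: the statement is the Claim_ definition above) =====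
theorem safecracker_spec : Claim_equal_safecracker := by
  intro start incs _
  unfold Spec_safecracker safecracker safecracker_alt
  simpa using loop_eq incs start (-1) start 0 [] (by ring_nf)
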